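-- pv_equiv track=rewrite | github.com/stazh/qzh_ortsnamenreconciling | xml_scan.py | normalize_raw_text
-- ===== SOURCE A (Python) =====
-- def normalize_raw_text(raw_text):
--     normalized_parts = []
--     raw_to_normalized = [0] * (len(raw_text) + 1)
--     normalized_length = 0
--     pending_space = False
--
--     for index, char in enumerate(raw_text):
--         raw_to_normalized[index] = normalized_length
--         if char.isspace():
--             if normalized_length > 0:
--                 pending_space = True
--         else:
--             if pending_space and normalized_length > 0:
--                 normalized_parts.append(" ")
--                 normalized_length += 1
--             pending_space = False
--             normalized_parts.append(char)
--             normalized_length += 1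
--         raw_to_normalized[index + 1] = normalized_length
--
--     return "".join(normalized_parts), raw_to_normalized
-- ===== SOURCE B (Python) =====
-- def normalize_raw_text(raw_text):
--     n = len(raw_text)
--     # Phase 1: collect maximal non-whitespace token spans.
--     spans = []
--     i = 0
--     while i < n:
--         if raw_text[i].isspace():
--             i += 1
--         else:
--             j = i + 1
--             while j < n and not raw_text[j].isspace():
--                 j += 1
--             spans.append((i, j))
--             i = j
--     normalized = " ".join(raw_text[s:e] for s, e in spans)
--     # Phase 2: fill the offset map span by span.
--     mapping = []
--     acc = 0
--     prev_end = 0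
--     for k, (s, e) in enumerate(spans):
--         mapping.extend([acc] * (s - prev_end))          # whitespace gap keeps acc
--         sep = 1 if k > 0 else 0                          # separator charged to this token
--         mapping.append(acc)                              # first char: before the separator
--         for t in range(1, e - s):
--             mapping.append(acc + sep + t)
--         acc += sep + (e - s)
--         prev_end = e
--     mapping.extend([acc] * (n + 1 - prev_end))           # trailing whitespace and the final slot
--     return normalized, mapping
-- ===== Notes on version B (the rewrite author's own statement) =====
-- stated objective: alternative
-- what changed: Replaces the single forward pending_space state machine (which interleaves normalization and per-char mapping writes) with a two-phase span construction: first collect maximal non-whitespace token spans and join their slices with spaces, then fill the raw-to-normalized map span by span in closed form.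
import Mathlib
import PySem

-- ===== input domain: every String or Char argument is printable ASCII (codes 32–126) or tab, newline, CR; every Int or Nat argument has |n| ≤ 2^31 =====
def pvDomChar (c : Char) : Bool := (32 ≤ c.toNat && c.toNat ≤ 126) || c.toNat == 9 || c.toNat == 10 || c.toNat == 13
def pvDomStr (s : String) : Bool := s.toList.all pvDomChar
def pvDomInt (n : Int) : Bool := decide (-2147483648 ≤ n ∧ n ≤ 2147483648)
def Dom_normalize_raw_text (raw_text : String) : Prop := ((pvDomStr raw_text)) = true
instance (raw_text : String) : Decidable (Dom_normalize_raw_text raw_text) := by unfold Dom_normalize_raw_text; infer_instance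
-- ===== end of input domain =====

-- B replaces A's forward pending_space state machine by a two-phase span construction
-- (collect maximal non-whitespace spans, join slices, fill the map span by span); same cost.

-- ===== PORT A =====
-- loop body of A's for-loop, as a named helper (state: parts, raw_to_normalized, normalized_length, pending_space)
def aStep (st : List Char × List Int × Int × Bool) (ic : Int × Char) : List Char × List Int × Int × Bool :=
  let (parts, m, len, pending) := st
  let (index, char) := ic
  let m := PySem.List.pySetD m index len
  if PySem.Chars.isspace char then
    let pending := if 0 < len then true else pending
    (parts, PySem.List.pySetD m (index + 1) len, len, pending)
  else
    let pl := if pending && decide (0 < len) then (parts ++ [' '], len + 1) else (parts, len)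
    let parts := pl.1 ++ [char]
    let len := pl.2 + 1
    (parts, PySem.List.pySetD m (index + 1) len, len, false)

def normalize_raw_text (raw_text : String) : String × List Int :=
  let chars := raw_text.toList
  let st := (PySem.List.enumerate chars 0).foldl aStep
      ([], List.replicate (chars.length + 1) (0 : Int), 0, false)
  (String.ofList st.1, st.2.1)

-- ===== PORT B =====
-- inner while loop of the tokenizer: advance j over non-whitespace, return (j, remaining suffix)
def scanEnd : List Char → Nat → Nat × List Char
  | [], j => (j, [])
  | c :: rest, j => if PySem.Chars.isspace c then (j, c :: rest) else scanEnd rest (j + 1)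

theorem scanEnd_len_le (l : List Char) (j : Nat) : (scanEnd l j).2.length ≤ l.length := by
  induction l generalizing j with
  | nil => simp [scanEnd]
  | cons c rest ih =>
    simp only [scanEnd]
    split
    · simp
    · exact Nat.le_succ_of_le (ih (j + 1))

-- outer while loop: maximal non-whitespace token spans (start, end)
def spansAux : List Char → Nat → List (Nat × Nat)
  | [], _ => []
  | c :: rest, i =>
    if PySem.Chars.isspace c then spansAux rest (i + 1)
    else
      let p := scanEnd rest (i + 1)
      (i, p.1) :: spansAux p.2 p.1
termination_by l => l.length
decreasing_by
  · exact Nat.lt_succ_of_le (Nat.le_refl _)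
  · exact Nat.lt_succ_of_le (scanEnd_len_le rest (i + 1))

-- body of B's mapping fold (state: mapping, acc, prev_end)
def bStep (st : List Int × Int × Nat) (kse : Int × Nat × Nat) : List Int × Int × Nat :=
  let (mapping, acc, prev_end) := st
  let (k, s, e) := kse
  let mapping := mapping ++ List.replicate (s - prev_end) acc
  let sep : Int := if 0 < k then 1 else 0
  let mapping := mapping ++ [acc]
  let mapping := mapping ++ (PySem.List.pyRange 1 ((e : Int) - (s : Int)) 1).map (fun t => acc + sep + t)
  (mapping, acc + sep + ((e : Int) - (s : Int)), e)

def normalize_raw_text_alt (raw_text : String) : String × List Int :=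
  let chars := raw_text.toList
  let n := chars.length
  let spans := spansAux chars 0
  let normalized := PySem.Str.join " "
      (spans.map (fun se => String.ofList (PySem.List.slice chars (some (se.1 : Int)) (some (se.2 : Int)))))
  let st := (PySem.List.enumerate spans 0).foldl bStep ([], 0, 0)
  let mapping := st.1 ++ List.replicate (n + 1 - st.2.2) st.2.1
  (normalized, mapping)

-- ===== PRECONDITION & SPEC =====
def Spec_normalize_raw_text (raw_text : String) (out : String × List Int) : Prop := out = normalize_raw_text_alt raw_text
instance (raw_text : String) (out : String × List Int) : Decidable (Spec_normalize_raw_text raw_text out) := by unfold Spec_normalize_raw_text; infer_instance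

-- ===== CLAIM (what is proved, stated in full; the proofs are below) =====
def Claim_equal_normalize_raw_text : Prop := ∀ (raw_text : String), Dom_normalize_raw_text raw_text → Spec_normalize_raw_text raw_text (normalize_raw_text raw_text)

-- ===== LEMMAS AND PROOFS =====

-- A's per-character state machine without the mapping writes: (parts, len, pending)
def sStep (st : List Char × Int × Bool) (c : Char) : List Char × Int × Bool :=
  let (parts, len, pending) := st
  if PySem.Chars.isspace c then
    (parts, len, if 0 < len then true else pending)
  else
    let pl := if pending && decide (0 < len) then (parts ++ [' '], len + 1) else (parts, len)
    (pl.1 ++ [c], pl.2 + 1, false)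

-- expected final mapping: A's raw_to_normalized[i] is the normalized length of the length-i prefix
def mapL (l : List Char) : List Int :=
  (List.range (l.length + 1)).map (fun i => ((l.take i).foldl sStep ([], 0, false)).2.1)

-- span list shifted by k
def shiftSp (k : Nat) (sp : List (Nat × Nat)) : List (Nat × Nat) := sp.map (fun se => (se.1 + k, se.2 + k))

-- mapping produced from a span list in "sep = 1" context (acc a, cursor prev, raw length n)
def mapRel : List (Nat × Nat) → Int → Nat → Nat → List Int
  | [], a, prev, n => List.replicate (n + 1 - prev) a
  | (s, e) :: r, a, prev, n =>
      List.replicate (s - prev) a ++ [a] ++ (PySem.List.pyRange 1 ((e : Int) - (s : Int)) 1).map (fun t => a + 1 + t)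
        ++ mapRel r (a + 1 + ((e : Int) - (s : Int))) e n

-- mapping produced from a span list at top level (first span has sep = 0)
def mapTop : List (Nat × Nat) → Nat → List Int
  | [], n => List.replicate (n + 1) 0
  | (s, e) :: r, n =>
      List.replicate s 0 ++ [0] ++ (PySem.List.pyRange 1 ((e : Int) - (s : Int)) 1).map (fun t => 0 + 0 + t)
        ++ mapRel r (0 + 0 + ((e : Int) - (s : Int))) e n

-- normalized chars contributed by spans after the first (each preceded by a space)
def partsRel (l : List Char) (sp : List (Nat × Nat)) : List Char :=
  sp.flatMap (fun se => ' ' :: ((l.drop se.1).take (se.2 - se.1)))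

-- normalized chars at top level
def partsTop (l : List Char) : List (Nat × Nat) → List Char
  | [] => []
  | (s, e) :: r => (l.drop s).take (e - s) ++ partsRel l r


theorem partsRel_cons (l : List Char) (s e : Nat) (r : List (Nat × Nat)) :
    partsRel l ((s, e) :: r) = (' ' :: ((l.drop s).take (e - s))) ++ partsRel l r := by
  simp [partsRel]

theorem mapRel_cons (s e : Nat) (r : List (Nat × Nat)) (a : Int) (prev n : Nat) :
    mapRel ((s, e) :: r) a prev n
      = List.replicate (s - prev) a ++ [a]
          ++ (PySem.List.pyRange 1 ((e : Int) - (s : Int)) 1).map (fun t => a + 1 + t)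
          ++ mapRel r (a + 1 + ((e : Int) - (s : Int))) e n := by
  simp [mapRel]

-- --- basic facts about the tokenizer ---

theorem scanEnd_eq (l : List Char) (j : Nat) :
    scanEnd l j = (j + (l.takeWhile (fun c => !PySem.Chars.isspace c)).length,
                   l.dropWhile (fun c => !PySem.Chars.isspace c)) := by
  induction l generalizing j with
  | nil => simp [scanEnd]
  | cons c rest ih =>
    by_cases h : PySem.Chars.isspace c = true
    · simp [scanEnd, h]
    · simp only [Bool.not_eq_true] at h
      simp [scanEnd, h, ih]
      omega

theorem shiftSp_shiftSp (k m : Nat) (sp : List (Nat × Nat)) :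
    shiftSp k (shiftSp m sp) = shiftSp (m + k) sp := by
  simp only [shiftSp, List.map_map]
  apply List.map_congr_left
  intro se _
  cases se
  simp [Function.comp]
  omega

theorem shiftSp_nil (k : Nat) : shiftSp k [] = [] := rfl

theorem shiftSp_cons (k s e : Nat) (r : List (Nat × Nat)) :
    shiftSp k ((s, e) :: r) = (s + k, e + k) :: shiftSp k r := rfl

theorem spansAux_nil (i : Nat) : spansAux [] i = [] := by simp [spansAux]

theorem spansAux_cons_space (c : Char) (rest : List Char) (i : Nat)
    (h : PySem.Chars.isspace c = true) : spansAux (c :: rest) i = spansAux rest (i + 1) := by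
  simp [spansAux, h]

theorem spansAux_cons_word (c : Char) (rest : List Char) (i : Nat)
    (h : PySem.Chars.isspace c = false) :
    spansAux (c :: rest) i
      = (i, (scanEnd rest (i + 1)).1) :: spansAux (scanEnd rest (i + 1)).2 (scanEnd rest (i + 1)).1 := by
  simp [spansAux, h]

theorem spansAux_shift (n : Nat) : ∀ (l : List Char), l.length ≤ n → ∀ (i : Nat),
    spansAux l i = shiftSp i (spansAux l 0) := by
  induction n with
  | zero =>
    intro l hl i
    have h0 : l = [] := List.eq_nil_of_length_eq_zero (Nat.le_zero.mp hl)
    subst h0; simp [spansAux_nil, shiftSp_nil]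
  | succ n ih =>
    intro l hl i
    match l with
    | [] => simp [spansAux_nil, shiftSp_nil]
    | c :: rest =>
      by_cases h : PySem.Chars.isspace c = true
      · rw [spansAux_cons_space c rest i h, spansAux_cons_space c rest 0 h]
        have hr : rest.length ≤ n := by simp at hl; omega
        rw [ih rest hr (i + 1), ih rest hr 1, shiftSp_shiftSp, Nat.add_comm 1 i]
      · have h' : PySem.Chars.isspace c = false := by simpa using h
        rw [spansAux_cons_word c rest i h', spansAux_cons_word c rest 0 h',
            scanEnd_eq rest (i + 1), scanEnd_eq rest 1]
        dsimp only
        have hR : (rest.dropWhile (fun c => !PySem.Chars.isspace c)).length ≤ n := by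
          have := List.length_dropWhile_le (fun c => !PySem.Chars.isspace c) rest
          simp at hl; omega
        rw [ih _ hR (i + 1 + (rest.takeWhile (fun c => !PySem.Chars.isspace c)).length),
            ih _ hR (1 + (rest.takeWhile (fun c => !PySem.Chars.isspace c)).length),
            shiftSp_cons, shiftSp_shiftSp]
        rw [show (0 : Nat) + i = i from by omega,
            show 1 + (rest.takeWhile (fun c => !PySem.Chars.isspace c)).length + i
              = i + 1 + (rest.takeWhile (fun c => !PySem.Chars.isspace c)).length from by omega]

theorem mapRel_shift (sp : List (Nat × Nat)) : ∀ (a : Int) (prev : Nat) (n k : Nat),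
    mapRel (shiftSp k sp) a (prev + k) (n + k) = mapRel sp a prev n := by
  induction sp with
  | nil =>
    intro a prev n k
    rw [shiftSp_nil]
    simp only [mapRel]
    rw [show n + k + 1 - (prev + k) = n + 1 - prev from by omega]
  | cons se r ih =>
    intro a prev n k
    obtain ⟨s, e⟩ := se
    rw [shiftSp_cons]
    simp only [mapRel]
    have hd : ((e + k : Nat) : Int) - ((s + k : Nat) : Int) = (e : Int) - (s : Int) := by
      push_cast; ring
    rw [hd, show s + k - (prev + k) = s - prev from by omega, ih]

theorem mapRel_cons_shift (sp : List (Nat × Nat)) (a : Int) (n : Nat) :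
    mapRel (shiftSp 1 sp) a 0 (n + 1) = a :: mapRel sp a 0 n := by
  cases sp with
  | nil =>
    rw [shiftSp_nil]
    simp only [mapRel]
    rw [show n + 1 + 1 - 0 = (n + 1 - 0) + 1 from by omega, List.replicate_succ]
  | cons se r =>
    obtain ⟨s, e⟩ := se
    rw [shiftSp_cons]
    simp only [mapRel]
    have hd : ((e + 1 : Nat) : Int) - ((s + 1 : Nat) : Int) = (e : Int) - (s : Int) := by
      push_cast; ring
    rw [hd, show mapRel (shiftSp 1 r) (a + 1 + ((e : Int) - (s : Int))) (e + 1) (n + 1)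
          = mapRel r (a + 1 + ((e : Int) - (s : Int))) e n from mapRel_shift r _ e n 1,
        show s + 1 - 0 = s + 1 from by omega, show s - 0 = s from by omega,
        List.replicate_succ]
    simp

theorem mapTop_cons_shift (sp : List (Nat × Nat)) (n : Nat) :
    mapTop (shiftSp 1 sp) (n + 1) = 0 :: mapTop sp n := by
  cases sp with
  | nil =>
    rw [shiftSp_nil]
    simp only [mapTop]
    rw [List.replicate_succ]
  | cons se r =>
    obtain ⟨s, e⟩ := se
    rw [shiftSp_cons]
    simp only [mapTop]
    have hd : ((e + 1 : Nat) : Int) - ((s + 1 : Nat) : Int) = (e : Int) - (s : Int) := by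
      push_cast; ring
    rw [hd, show mapRel (shiftSp 1 r) (0 + 0 + ((e : Int) - (s : Int))) (e + 1) (n + 1)
          = mapRel r (0 + 0 + ((e : Int) - (s : Int))) e n from mapRel_shift r _ e n 1,
        List.replicate_succ]
    simp

theorem partsRel_shift (u v : List Char) (sp : List (Nat × Nat)) :
    partsRel (u ++ v) (shiftSp u.length sp) = partsRel v sp := by
  induction sp with
  | nil => rfl
  | cons se r ih =>
    obtain ⟨s, e⟩ := se
    rw [shiftSp_cons]
    simp only [partsRel, List.flatMap_cons] at *
    have h1 : e + u.length - (s + u.length) = e - s := by omega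
    have h2 : List.drop (s + u.length) (u ++ v) = List.drop s v := by
      rw [List.drop_append, List.drop_of_length_le (by omega),
          show s + u.length - u.length = s from by omega]
      simp
    rw [h1, h2, ih]

theorem partsTop_cons_shift (c : Char) (v : List Char) (sp : List (Nat × Nat)) :
    partsTop (c :: v) (shiftSp 1 sp) = partsTop v sp := by
  cases sp with
  | nil => rfl
  | cons se r =>
    obtain ⟨s, e⟩ := se
    rw [shiftSp_cons]
    simp only [partsTop]
    rw [show (c :: v) = [c] ++ v from rfl, show (1 : Nat) = [c].length from rfl,
        partsRel_shift [c] v r]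
    rw [show e + [c].length - (s + [c].length) = e - s from by omega,
        show List.drop (s + [c].length) ([c] ++ v) = List.drop s v from by
          rw [List.drop_append, List.drop_of_length_le (by simp)]
          simp]


theorem token_run (w : List Char) (h : ∀ c ∈ w, PySem.Chars.isspace c = false)
    (P : List Char) (a : Int) :
    w.foldl sStep (P, a, false) = (P ++ w, a + w.length, false) := by
  induction w generalizing P a with
  | nil => simp
  | cons c rest ih =>
    have hc := h c (by simp)
    have hs : sStep (P, a, false) c = (P ++ [c], a + 1, false) := by simp [sStep, hc]
    rw [List.foldl_cons, hs, ih (fun x hx => h x (List.mem_cons_of_mem _ hx))]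
    simp
    ring

-- --- the central induction: processing a suffix in 'after a token' context ---

theorem pyRange_one_natCast (m : Nat) :
    PySem.List.pyRange 1 ((m + 1 : Nat) : Int) 1 = (List.range m).map (fun i => ((i + 1 : Nat) : Int)) := by
  induction m with
  | zero => decide
  | succ m ih =>
    rw [show ((m + 1 + 1 : Nat) : Int) = ((m + 1 : Nat) : Int) + 1 from by push_cast; ring,
        PySem.List.pyRange_one_succ_right (by exact_mod_cast Nat.succ_le_succ (Nat.zero_le m)),
        ih, List.range_succ, List.map_append]
    simp

theorem chunk_map (m : Nat) (G : Nat → Int) (a sep : Int) (h0 : G 0 = a)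
    (hs : ∀ i : Nat, i < m → G (i + 1) = a + sep + ((i + 1 : Nat) : Int)) :
    (List.range (m + 1)).map G
      = a :: (PySem.List.pyRange 1 ((m + 1 : Nat) : Int) 1).map (fun t => a + sep + t) := by
  rw [List.range_succ_eq_map, pyRange_one_natCast, List.map_map, List.map_cons, h0, List.map_map]
  congr 1
  apply List.map_congr_left
  intro i hi
  simp only [List.mem_range] at hi
  simpa using hs i hi

theorem M1 (N : Nat) : ∀ (l : List Char), l.length ≤ N → ∀ (P : List Char) (a : Int) (b : Bool),
    0 < a → (b = true ∨ (∀ c ∈ l.head?, PySem.Chars.isspace c = true)) →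
    (l.foldl sStep (P, a, b)).1 = P ++ partsRel l (spansAux l 0) ∧
    (List.range (l.length + 1)).map (fun i => ((l.take i).foldl sStep (P, a, b)).2.1)
      = mapRel (spansAux l 0) a 0 l.length := by
  induction N with
  | zero =>
    intro l hl P a b _ _
    have h0 : l = [] := List.eq_nil_of_length_eq_zero (Nat.le_zero.mp hl)
    subst h0
    exact ⟨by simp [partsRel, spansAux_nil], by simp [mapRel, spansAux_nil]⟩
  | succ N ih =>
    intro l hl P a b ha hb
    match l with
    | [] => exact ⟨by simp [partsRel, spansAux_nil], by simp [mapRel, spansAux_nil]⟩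
    | c :: rest =>
      by_cases hsp : PySem.Chars.isspace c = true
      · -- whitespace: pending becomes true, spans shift by one
        have hstep : sStep (P, a, b) c = (P, a, true) := by
          simp [sStep, hsp, ha]
        have hIH := ih rest (by simp at hl; omega) P a true ha (Or.inl rfl)
        have hspans : spansAux (c :: rest) 0 = shiftSp 1 (spansAux rest 0) := by
          rw [spansAux_cons_space c rest 0 hsp, spansAux_shift rest.length rest (le_refl _) 1]
        constructor
        · rw [List.foldl_cons, hstep, hIH.1, hspans,
              show (c :: rest) = [c] ++ rest from rfl, show (1 : Nat) = [c].length from rfl,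
              partsRel_shift [c] rest]
        · rw [hspans, show (c :: rest).length = rest.length + 1 from rfl, mapRel_cons_shift,
              List.range_succ_eq_map, List.map_cons, List.map_map]
          rw [← hIH.2]
          simp only [List.take_zero, List.foldl_nil]
          congr 1
          apply List.map_congr_left
          intro i _
          simp only [Function.comp_apply, List.take_succ_cons, List.foldl_cons, hstep]
      · -- word character: consume the whole token, then recurse on the rest
        have hsp' : PySem.Chars.isspace c = false := by simpa using hsp
        have hb' : b = true := by
          rcases hb with hb | hh
          · exact hb
          · exact absurd (hh c (by simp)) hsp
        subst hb'
        have hstep : sStep (P, a, true) c = ((P ++ [' ']) ++ [c], a + 1 + 1, false) := by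
          simp [sStep, hsp', ha]
        have hT : ∀ x ∈ rest.takeWhile (fun c => !PySem.Chars.isspace c),
            PySem.Chars.isspace x = false := by
          intro x hx
          have := List.mem_takeWhile_imp hx
          simpa using this
        have hTR : rest.takeWhile (fun c => !PySem.Chars.isspace c)
            ++ rest.dropWhile (fun c => !PySem.Chars.isspace c) = rest :=
          List.takeWhile_append_dropWhile
        have hRlen : (rest.dropWhile (fun c => !PySem.Chars.isspace c)).length ≤ N := by
          have := List.length_dropWhile_le (fun c => !PySem.Chars.isspace c) rest
          simp at hl; omega
        have hRhead : ∀ c' ∈ (rest.dropWhile (fun c => !PySem.Chars.isspace c)).head?,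
            PySem.Chars.isspace c' = true := by
          intro c' hc'
          have h2 := List.head?_dropWhile_not (fun c => !PySem.Chars.isspace c) rest
          revert hc' h2
          cases (rest.dropWhile (fun c => !PySem.Chars.isspace c)).head? with
          | none => intro hc' _; cases hc'
          | some x =>
            intro hc' h2
            simp only [Option.mem_def, Option.some.injEq] at hc'
            subst hc'
            simpa using h2
        set T := rest.takeWhile (fun c => !PySem.Chars.isspace c) with hTdef
        set R := rest.dropWhile (fun c => !PySem.Chars.isspace c) with hRdef
        have ha' : (0 : Int) < a + 1 + 1 + T.length := by
          have : (0 : Int) ≤ (T.length : Int) := Int.natCast_nonneg _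
          omega
        have hIH := ih R hRlen ((P ++ [' ']) ++ [c] ++ T) (a + 1 + 1 + T.length) false
          ha' (Or.inr hRhead)
        have hspans : spansAux (c :: rest) 0
            = (0, T.length + 1) :: shiftSp (T.length + 1) (spansAux R 0) := by
          rw [spansAux_cons_word c rest 0 hsp', scanEnd_eq rest 1]
          dsimp only
          rw [spansAux_shift R.length R (le_refl _) (1 + T.length), Nat.add_comm 1 T.length]
        have hfoldTake : ∀ X : List Char, (c :: (T ++ X)).foldl sStep (P, a, true)
            = X.foldl sStep ((P ++ [' ']) ++ [c] ++ T, a + 1 + 1 + T.length, false) := by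
          intro X
          rw [List.foldl_cons, hstep, List.foldl_append, token_run T hT]
        constructor
        · -- parts
          conv_lhs => rw [show c :: rest = c :: (T ++ R) from by rw [hTR]]
          rw [hfoldTake R, hIH.1, hspans, partsRel_cons,
              show c :: rest = (c :: T) ++ R from by rw [← hTR]; rfl,
              show T.length + 1 = (c :: T).length from by simp,
              partsRel_shift (c :: T) R, List.drop_zero,
              show (c :: T).length - 0 = (c :: T).length from by omega,
              show ((c :: T) ++ R).take (c :: T).length = c :: T from List.take_left]
          simp [List.append_assoc]
        · -- mapping
          rw [hspans, mapRel_cons]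
          have hlen : (c :: rest).length + 1 = (T.length + 1) + (R.length + 1) := by
            have : rest.length = T.length + R.length := by
              rw [← hTR]; simp
            simp [this]; omega
          rw [hlen, List.range_add, List.map_append, List.map_map]
          have hchunk1 : (List.range (T.length + 1)).map
                (fun i => (((c :: rest).take i).foldl sStep (P, a, true)).2.1)
              = a :: (PySem.List.pyRange 1 ((T.length + 1 : Nat) : Int) 1).map (fun t => a + 1 + t) := by
            apply chunk_map
            · simp
            · intro i hi
              have ht : (c :: rest).take (i + 1) = c :: T.take i := by
                rw [List.take_succ_cons]
                congr 1
                rw [← hTR, List.take_append_of_le_length (by omega)]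
              rw [ht, List.foldl_cons, hstep,
                  token_run (T.take i) (fun x hx => hT x (List.mem_of_mem_take hx))]
              dsimp only
              rw [List.length_take, Nat.min_eq_left (le_of_lt hi)]
              push_cast
              ring
          have hchunk2 : (List.range (R.length + 1)).map
                ((fun i => (((c :: rest).take i).foldl sStep (P, a, true)).2.1)
                  ∘ (fun x => T.length + 1 + x))
              = mapRel (spansAux R 0) (a + 1 + 1 + T.length) 0 R.length := by
            rw [← hIH.2]
            apply List.map_congr_left
            intro i' hi'
            simp only [Function.comp_apply]
            have ht : (c :: rest).take (T.length + 1 + i') = c :: (T ++ R.take i') := by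
              rw [show T.length + 1 + i' = (T.length + i') + 1 from by omega,
                  List.take_succ_cons]
              congr 1
              rw [← hTR, List.take_append, List.take_of_length_le (by omega),
                  show T.length + i' - T.length = i' from by omega]
            rw [ht, hfoldTake (R.take i')]
          rw [hchunk1, hchunk2]
          have hcast : ((T.length + 1 : Nat) : Int) - ((0 : Nat) : Int)
              = ((T.length + 1 : Nat) : Int) := by push_cast; ring
          rw [hcast,
              show mapRel (shiftSp (T.length + 1) (spansAux R 0))
                  (a + 1 + ((T.length + 1 : Nat) : Int)) (T.length + 1) (c :: rest).length
                = mapRel (spansAux R 0) (a + 1 + ((T.length + 1 : Nat) : Int)) 0 R.length from by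
                  have h := mapRel_shift (spansAux R 0) (a + 1 + ((T.length + 1 : Nat) : Int))
                    0 R.length (T.length + 1)
                  rw [Nat.zero_add] at h
                  rw [show (c :: rest).length = R.length + (T.length + 1) from by omega]
                  exact h,
              show a + 1 + ((T.length + 1 : Nat) : Int) = a + 1 + 1 + T.length from by push_cast; ring,
              show (0 : Nat) - 0 = 0 from rfl, List.replicate_zero, List.nil_append]
          simp
  

theorem mapTop_cons (s e : Nat) (r : List (Nat × Nat)) (n : Nat) :
    mapTop ((s, e) :: r) n
      = List.replicate s 0 ++ [(0 : Int)]
          ++ (PySem.List.pyRange 1 ((e : Int) - (s : Int)) 1).map (fun t => 0 + 0 + t)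
          ++ mapRel r (0 + 0 + ((e : Int) - (s : Int))) e n := by
  simp [mapTop]

theorem M0 (l : List Char) :
    (l.foldl sStep ([], 0, false)).1 = partsTop l (spansAux l 0) ∧
    (List.range (l.length + 1)).map (fun i => ((l.take i).foldl sStep ([], 0, false)).2.1)
      = mapTop (spansAux l 0) l.length := by
  induction l with
  | nil => exact ⟨by simp [partsTop, spansAux_nil], by simp [mapTop, spansAux_nil]⟩
  | cons c rest ihM =>
    by_cases hsp : PySem.Chars.isspace c = true
    · have hstep : sStep ([], 0, false) c = ([], 0, false) := by simp [sStep, hsp]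
      have hspans : spansAux (c :: rest) 0 = shiftSp 1 (spansAux rest 0) := by
        rw [spansAux_cons_space c rest 0 hsp, spansAux_shift rest.length rest (le_refl _) 1]
      constructor
      · rw [List.foldl_cons, hstep, ihM.1, hspans, partsTop_cons_shift]
      · rw [hspans, show (c :: rest).length = rest.length + 1 from rfl, mapTop_cons_shift,
            List.range_succ_eq_map, List.map_cons, List.map_map, ← ihM.2]
        simp only [List.take_zero, List.foldl_nil]
        congr 1
        apply List.map_congr_left
        intro i _
        simp only [Function.comp_apply, List.take_succ_cons, List.foldl_cons, hstep]
    · have hsp' : PySem.Chars.isspace c = false := by simpa using hsp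
      have hstep : sStep ([], 0, false) c = ([c], 0 + 1, false) := by
        simp [sStep, hsp']
      have hT : ∀ x ∈ rest.takeWhile (fun c => !PySem.Chars.isspace c),
          PySem.Chars.isspace x = false := by
        intro x hx
        have := List.mem_takeWhile_imp hx
        simpa using this
      have hTR : rest.takeWhile (fun c => !PySem.Chars.isspace c)
          ++ rest.dropWhile (fun c => !PySem.Chars.isspace c) = rest :=
        List.takeWhile_append_dropWhile
      have hRhead : ∀ c' ∈ (rest.dropWhile (fun c => !PySem.Chars.isspace c)).head?,
          PySem.Chars.isspace c' = true := by
        intro c' hc'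
        have h2 := List.head?_dropWhile_not (fun c => !PySem.Chars.isspace c) rest
        revert hc' h2
        cases (rest.dropWhile (fun c => !PySem.Chars.isspace c)).head? with
        | none => intro hc' _; cases hc'
        | some x =>
          intro hc' h2
          simp only [Option.mem_def, Option.some.injEq] at hc'
          subst hc'
          simpa using h2
      set T := rest.takeWhile (fun c => !PySem.Chars.isspace c) with hTdef
      set R := rest.dropWhile (fun c => !PySem.Chars.isspace c) with hRdef
      have ha' : (0 : Int) < 0 + 1 + T.length := by
        have : (0 : Int) ≤ (T.length : Int) := Int.natCast_nonneg _
        omega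
      have hIH := M1 R.length R (le_refl _) ([c] ++ T) (0 + 1 + T.length) false
        ha' (Or.inr hRhead)
      have hspans : spansAux (c :: rest) 0
          = (0, T.length + 1) :: shiftSp (T.length + 1) (spansAux R 0) := by
        rw [spansAux_cons_word c rest 0 hsp', scanEnd_eq rest 1]
        dsimp only
        rw [spansAux_shift R.length R (le_refl _) (1 + T.length), Nat.add_comm 1 T.length]
      have hfoldTake : ∀ X : List Char, (c :: (T ++ X)).foldl sStep ([], 0, false)
          = X.foldl sStep ([c] ++ T, 0 + 1 + T.length, false) := by
        intro X
        rw [List.foldl_cons, hstep, List.foldl_append, token_run T hT]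
      constructor
      · conv_lhs => rw [show c :: rest = c :: (T ++ R) from by rw [hTR]]
        rw [hfoldTake R, hIH.1, hspans]
        simp only [partsTop]
        rw [show c :: rest = (c :: T) ++ R from by rw [← hTR]; rfl,
            show T.length + 1 = (c :: T).length from by simp,
            partsRel_shift (c :: T) R, List.drop_zero,
            show (c :: T).length - 0 = (c :: T).length from by omega,
            show ((c :: T) ++ R).take (c :: T).length = c :: T from List.take_left]
        simp
      · rw [hspans, mapTop_cons]
        have hlen : (c :: rest).length + 1 = (T.length + 1) + (R.length + 1) := by
          have : rest.length = T.length + R.length := by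
            rw [← hTR]; simp
          simp [this]; omega
        rw [hlen, List.range_add, List.map_append, List.map_map]
        have hchunk1 : (List.range (T.length + 1)).map
              (fun i => (((c :: rest).take i).foldl sStep ([], 0, false)).2.1)
            = (0 : Int) :: (PySem.List.pyRange 1 ((T.length + 1 : Nat) : Int) 1).map
                (fun t => 0 + 0 + t) := by
          apply chunk_map
          · simp
          · intro i hi
            have ht : (c :: rest).take (i + 1) = c :: T.take i := by
              rw [List.take_succ_cons]
              congr 1
              rw [← hTR, List.take_append_of_le_length (by omega)]
            rw [ht, List.foldl_cons, hstep,
                token_run (T.take i) (fun x hx => hT x (List.mem_of_mem_take hx))]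
            dsimp only
            rw [List.length_take, Nat.min_eq_left (le_of_lt hi)]
            push_cast
            ring
        have hchunk2 : (List.range (R.length + 1)).map
              ((fun i => (((c :: rest).take i).foldl sStep ([], 0, false)).2.1)
                ∘ (fun x => T.length + 1 + x))
            = mapRel (spansAux R 0) (0 + 1 + T.length) 0 R.length := by
          rw [← hIH.2]
          apply List.map_congr_left
          intro i' hi'
          simp only [Function.comp_apply]
          have ht : (c :: rest).take (T.length + 1 + i') = c :: (T ++ R.take i') := by
            rw [show T.length + 1 + i' = (T.length + i') + 1 from by omega,
                List.take_succ_cons]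
            congr 1
            rw [← hTR, List.take_append, List.take_of_length_le (by omega),
                show T.length + i' - T.length = i' from by omega]
          rw [ht, hfoldTake (R.take i')]
        rw [hchunk1, hchunk2]
        have hcast : ((T.length + 1 : Nat) : Int) - ((0 : Nat) : Int)
            = ((T.length + 1 : Nat) : Int) := by push_cast; ring
        rw [hcast,
            show mapRel (shiftSp (T.length + 1) (spansAux R 0))
                (0 + 0 + ((T.length + 1 : Nat) : Int)) (T.length + 1) (c :: rest).length
              = mapRel (spansAux R 0) (0 + 0 + ((T.length + 1 : Nat) : Int)) 0 R.length from by
                have h := mapRel_shift (spansAux R 0) (0 + 0 + ((T.length + 1 : Nat) : Int))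
                  0 R.length (T.length + 1)
                rw [Nat.zero_add] at h
                rw [show (c :: rest).length = R.length + (T.length + 1) from by omega]
                exact h,
            show (0 : Int) + 0 + ((T.length + 1 : Nat) : Int) = 0 + 1 + (T.length : Int) from by
              push_cast; ring]
        simp

-- --- A's fold equals the state machine plus the prefix-length map ---

theorem set_map_range_last (n : Nat) (f : Nat → Int) :
    ((List.range (n + 1)).map f).set n (f n) = (List.range (n + 1)).map f := by
  apply List.ext_getElem
  · simp
  · intro i h1 h2
    rw [List.getElem_set]
    split
    · subst ‹n = i›
      simp
    · rfl

theorem length_mapL (l : List Char) : (mapL l).length = l.length + 1 := by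
  simp [mapL]

theorem mapL_append (l : List Char) (c : Char) :
    mapL (l ++ [c]) = mapL l ++ [((l ++ [c]).foldl sStep ([], 0, false)).2.1] := by
  simp only [mapL, List.length_append, List.length_cons, List.length_nil, Nat.zero_add]
  rw [List.range_succ, List.map_append]
  congr 1
  · apply List.map_congr_left
    intro i hi
    simp only [List.mem_range] at hi
    rw [List.take_append_of_le_length (by omega)]
  · simp only [List.map_cons, List.map_nil]
    rw [List.take_of_length_le (by simp)]

theorem A_inv (N : Nat) : ∀ (l : List Char), l.length ≤ N →
    (PySem.List.enumerate l 0).foldl aStep ([], List.replicate (N + 1) (0 : Int), 0, false)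
      = ((l.foldl sStep ([], 0, false)).1,
         mapL l ++ List.replicate (N - l.length) 0,
         (l.foldl sStep ([], 0, false)).2.1,
         (l.foldl sStep ([], 0, false)).2.2) := by
  intro l
  induction l using List.reverseRecOn with
  | nil =>
    intro _
    simp [PySem.List.enumerate, mapL, List.replicate_succ]
  | append_singleton l c ih =>
    intro h
    have hl : l.length ≤ N := by simp at h; omega
    have hlN : l.length + 1 ≤ N := by simpa using h
    rw [PySem.List.enumerate_append, List.foldl_append, ih hl, PySem.List.enumerate_cons,
        show PySem.List.enumerate ([] : List Char) (0 + (l.length : Int) + 1) = [] from by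
          simp [PySem.List.enumerate],
        List.foldl_cons, List.foldl_nil]
    conv_rhs => rw [List.foldl_append, List.foldl_cons, List.foldl_nil]
    rcases hS : l.foldl sStep ([], 0, false) with ⟨p, len, pend⟩
    rw [mapL_append, List.foldl_append, List.foldl_cons, List.foldl_nil, hS]
    have hidx : (0 : Int) + (l.length : Int) = ((l.length : Nat) : Int) := by omega
    have hmA : PySem.List.pySetD (mapL l ++ List.replicate (N - l.length) (0 : Int))
        ((l.length : Nat) : Int) len = mapL l ++ List.replicate (N - l.length) 0 := by
      rw [PySem.List.pySetD_natCast, List.set_append, if_pos (by rw [length_mapL]; omega)]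
      congr 1
      have hv : len = (fun i => ((l.take i).foldl sStep ([], 0, false)).2.1) l.length := by
        simp only [List.take_length, hS]
      rw [mapL]
      conv_lhs => rw [hv]
      exact set_map_range_last l.length _
    have hmB : ∀ v : Int, PySem.List.pySetD (mapL l ++ List.replicate (N - l.length) (0 : Int))
        (((l.length : Nat) : Int) + 1) v
        = (mapL l ++ [v]) ++ List.replicate (N - (l.length + 1)) 0 := by
      intro v
      rw [show ((l.length : Nat) : Int) + 1 = ((l.length + 1 : Nat) : Int) from by push_cast; ring,
          PySem.List.pySetD_natCast, List.set_append, if_neg (by rw [length_mapL]; omega),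
          show l.length + 1 - (mapL l).length = 0 from by rw [length_mapL]; omega,
          show N - l.length = (N - (l.length + 1)) + 1 from by omega, List.replicate_succ,
          List.set_cons_zero]
      simp [List.append_assoc]
    by_cases hc : PySem.Chars.isspace c = true
    · simp only [aStep, sStep, hc]
      rw [hidx, hmA, hmB len]
      simp [show (l ++ [c]).length = l.length + 1 from by simp]
    · have hc' : PySem.Chars.isspace c = false := by simpa using hc
      simp only [aStep, sStep, hc', Bool.false_eq_true, if_false]
      rw [hidx, hmA, hmB _]
      simp [show (l ++ [c]).length = l.length + 1 from by simp]

-- --- B's pieces ---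

theorem foldB_enum (sp : List (Nat × Nat)) : ∀ (st : List Int × Int × Nat) (k : Int), 0 < k →
    (PySem.List.enumerate sp k).foldl bStep st = sp.foldl (fun st se => bStep st (1, se)) st := by
  induction sp with
  | nil => intro st k _; simp [PySem.List.enumerate]
  | cons se r ih =>
    intro st k hk
    rw [PySem.List.enumerate_cons, List.foldl_cons, List.foldl_cons, ih _ (k + 1) (by omega)]
    obtain ⟨s, e⟩ := se
    simp [bStep, hk]

theorem mapFull (sp : List (Nat × Nat)) : ∀ (m : List Int) (a : Int) (prev n : Nat),
    (let r := sp.foldl (fun st se => bStep st (1, se)) (m, a, prev);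
     r.1 ++ List.replicate (n + 1 - r.2.2) r.2.1) = m ++ mapRel sp a prev n := by
  induction sp with
  | nil => intro m a prev n; simp [mapRel]
  | cons se r ih =>
    intro m a prev n
    obtain ⟨s, e⟩ := se
    have hb : bStep (m, a, prev) (1, s, e)
        = (m ++ List.replicate (s - prev) a ++ [a]
             ++ (PySem.List.pyRange 1 ((e : Int) - (s : Int)) 1).map (fun t => a + 1 + t),
           a + 1 + ((e : Int) - (s : Int)), e) := by
      simp [bStep]
    rw [List.foldl_cons, hb]
    simp only at ih ⊢
    rw [ih]
    simp [mapRel, List.append_assoc]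

theorem B_map (sp : List (Nat × Nat)) (n : Nat) :
    (let st := (PySem.List.enumerate sp 0).foldl bStep ([], 0, 0);
     st.1 ++ List.replicate (n + 1 - st.2.2) st.2.1) = mapTop sp n := by
  cases sp with
  | nil => simp [PySem.List.enumerate, mapTop]
  | cons se r =>
    obtain ⟨s, e⟩ := se
    have h0 : bStep ([], 0, 0) (0, s, e)
        = (List.replicate (s - 0) 0 ++ [(0 : Int)]
             ++ (PySem.List.pyRange 1 ((e : Int) - (s : Int)) 1).map (fun t => 0 + 0 + t),
           0 + 0 + ((e : Int) - (s : Int)), e) := by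
      simp [bStep]
    rw [PySem.List.enumerate_cons, List.foldl_cons, foldB_enum r _ (0 + 1) (by omega), h0]
    have := mapFull r (List.replicate (s - 0) 0 ++ [(0 : Int)]
             ++ (PySem.List.pyRange 1 ((e : Int) - (s : Int)) 1).map (fun t => 0 + 0 + t))
             (0 + 0 + ((e : Int) - (s : Int))) e n
    simp only at this ⊢
    rw [this]
    simp [mapTop, List.append_assoc]

theorem join_flat (l : List Char) (r : List (Nat × Nat)) : ∀ (x : List Char),
    PySem.Chars.join [' ']
      (x :: r.map (fun se => PySem.List.slice l (some (se.1 : Int)) (some (se.2 : Int))))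
      = x ++ partsRel l r := by
  induction r with
  | nil => intro x; simp [PySem.Chars.join_singleton, partsRel]
  | cons se r' ih =>
    intro x
    rw [List.map_cons, PySem.Chars.join_cons_cons, ih]
    obtain ⟨s, e⟩ := se
    rw [PySem.List.slice_natCast]
    simp [partsRel, List.append_assoc]

theorem B_join (l : List Char) (sp : List (Nat × Nat)) :
    PySem.Chars.join [' ']
      (sp.map (fun se => PySem.List.slice l (some (se.1 : Int)) (some (se.2 : Int))))
      = partsTop l sp := by
  cases sp with
  | nil => simp [PySem.Chars.join_nil, partsTop]
  | cons se r =>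
    obtain ⟨s, e⟩ := se
    rw [List.map_cons, join_flat, PySem.List.slice_natCast]
    simp [partsTop]

-- ===== VERDICT moved below =====


-- ===== VERDICT (by name: the statement is the Claim_ definition above) =====
theorem normalize_raw_text_spec : Claim_equal_normalize_raw_text := by
  intro raw _
  unfold Spec_normalize_raw_text
  simp only [normalize_raw_text, normalize_raw_text_alt]
  rw [A_inv raw.toList.length raw.toList (le_refl _)]
  have hB := B_map (spansAux raw.toList 0) raw.toList.length
  simp only at hB ⊢
  rw [Nat.sub_self, List.replicate_zero, List.append_nil, hB]
  have hstr : String.ofList (raw.toList.foldl sStep ([], 0, false)).1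
      = PySem.Str.join " " ((spansAux raw.toList 0).map
          (fun se => String.ofList (PySem.List.slice raw.toList (some (se.1 : Int)) (some (se.2 : Int))))) := by
    rw [← String.ofList_toList (s := PySem.Str.join " " _), PySem.Str.toList_join]
    congr 1
    rw [List.map_map]
    have : (String.toList ∘ fun (se : Nat × Nat) =>
        String.ofList (PySem.List.slice raw.toList (some (se.1 : Int)) (some (se.2 : Int))))
        = fun (se : Nat × Nat) => PySem.List.slice raw.toList (some (se.1 : Int)) (some (se.2 : Int)) := by
      funext se
      simp [String.toList_ofList]
    rw [show (" " : String).toList = [' '] from rfl, this, B_join, (M0 raw.toList).1]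
  have hmap2 : mapL raw.toList = mapTop (spansAux raw.toList 0) raw.toList.length := by
    rw [mapL]
    exact (M0 raw.toList).2
  exact congrArg₂ Prod.mk hstr hmap2
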